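-- pv_equiv track=rewrite | github.com/PtoNP/bva | bva/preprocess.py | multiply_targets
-- ===== SOURCE A (Python) =====
-- def multiply_targets(y, nb_frames_per_window):
--     i = 0
--     while i < len(y)-nb_frames_per_window:
--         if y[i] != 'no_hit':
--             for j in range(nb_frames_per_window):
--                 y[i+j+1] = y[i]
--             i += nb_frames_per_window + 1
--         else:
--             i += 1
--     return y
-- ===== SOURCE B (Python) =====
-- def multiply_targets(y, nb_frames_per_window):
--     n = len(y)
--     remaining = 0
--     fill = None
--     for i in range(n):
--         if remaining > 0:
--             y[i] = fill
--             remaining -= 1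
--         elif i < n - nb_frames_per_window and y[i] != 'no_hit':
--             fill = y[i]
--             remaining = nb_frames_per_window
--     return y
-- ===== Notes on version B (the rewrite author's own statement) =====
-- stated objective: simpler
-- what changed: Replaced A's while-loop with index jumps and an inner write loop by a single flat forward pass that carries a countdown counter and the value to propagate, writing each position at most once as it is visited.
import Mathlib
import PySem

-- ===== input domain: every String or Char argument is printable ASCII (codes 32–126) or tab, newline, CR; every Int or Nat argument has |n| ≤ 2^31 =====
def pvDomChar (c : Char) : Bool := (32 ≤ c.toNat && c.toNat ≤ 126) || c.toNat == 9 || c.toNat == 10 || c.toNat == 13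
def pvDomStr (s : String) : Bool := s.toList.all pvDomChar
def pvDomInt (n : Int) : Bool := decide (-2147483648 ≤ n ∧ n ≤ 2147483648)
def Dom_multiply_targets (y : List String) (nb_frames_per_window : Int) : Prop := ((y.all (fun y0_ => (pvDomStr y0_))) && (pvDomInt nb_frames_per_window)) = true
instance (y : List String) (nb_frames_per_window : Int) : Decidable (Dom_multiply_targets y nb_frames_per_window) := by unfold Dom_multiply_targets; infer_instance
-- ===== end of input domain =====

-- B replaces A's jump-based while loop by one flat pass with a countdown state (objective: simpler).
-- Python A and B mutate y in place and return it; the equivalence proved here is about the return value.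

-- ===== PORT A =====
-- A's while loop, with fuel making the recursion structural; inside Pre_ (0 ≤ nb) the loop
-- advances i by at least 1 each iteration, so fuel y.length + 1 never runs out.
def pvALoop (nb : Int) (fuel : Nat) (i : Int) (ys : List String) : List String :=
  match fuel with
  | 0 => ys
  | Nat.succ fuel =>
    if i < (ys.length : Int) - nb then
      match PySem.List.pyGet? ys i with
      | none => ys   -- IndexError; unreachable under Pre_
      | some v =>
        if v ≠ "no_hit" then
          pvALoop nb fuel (i + nb + 1)
            ((PySem.List.pyRange 0 nb 1).foldl (fun acc j => PySem.List.pySetD acc (i + j + 1) v) ys)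
        else
          pvALoop nb fuel (i + 1) ys
    else ys

def multiply_targets (y : List String) (nb_frames_per_window : Int) : List String :=
  pvALoop nb_frames_per_window (y.length + 1) 0 y

-- ===== PORT B =====
-- B's for-loop over y: state = (index i, remaining countdown, fill value).
def pvBLoop (nb n : Int) (i : Int) (remaining : Int) (fill : String) : List String → List String
  | [] => []
  | x :: xs =>
    if remaining > 0 then fill :: pvBLoop nb n (i + 1) (remaining - 1) fill xs
    else if i < n - nb ∧ x ≠ "no_hit" then x :: pvBLoop nb n (i + 1) nb x xs
    else x :: pvBLoop nb n (i + 1) remaining fill xs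

def multiply_targets_alt (y : List String) (nb_frames_per_window : Int) : List String :=
  pvBLoop nb_frames_per_window (y.length : Int) 0 0 "" y

-- ===== PRECONDITION & SPEC =====
-- For negative nb_frames_per_window the Python A never returns (IndexError or an infinite loop),
-- so Pre_ keeps exactly the inputs on which A terminates normally.
def Pre_multiply_targets (y : List String) (nb_frames_per_window : Int) : Prop :=
  0 ≤ nb_frames_per_window
instance (y : List String) (nb_frames_per_window : Int) : Decidable (Pre_multiply_targets y nb_frames_per_window) := by unfold Pre_multiply_targets; infer_instance
def pvWitness_multiply_targets : List String × Int := (["hit", "no_hit", "no_hit"], 1)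

def Spec_multiply_targets (y : List String) (nb_frames_per_window : Int) (out : List String) : Prop := out = multiply_targets_alt y nb_frames_per_window
instance (y : List String) (nb_frames_per_window : Int) (out : List String) : Decidable (Spec_multiply_targets y nb_frames_per_window out) := by unfold Spec_multiply_targets; infer_instance

-- ===== CLAIM (what is proved, stated in full; the proofs are below) =====
def Claim_equal_multiply_targets : Prop := ∀ (y : List String) (nb_frames_per_window : Int), Dom_multiply_targets y nb_frames_per_window → Pre_multiply_targets y nb_frames_per_window → Spec_multiply_targets y nb_frames_per_window (multiply_targets y nb_frames_per_window)
-- ===== LEMMAS AND PROOFS =====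

-- B's loop does not depend on the carried fill value while the countdown is 0.
theorem pvBLoop_fill_irrel (nb n : Int) : ∀ (xs : List String) (i : Int) (f g : String),
    pvBLoop nb n i 0 f xs = pvBLoop nb n i 0 g xs := by
  intro xs
  induction xs with
  | nil => intro i f g; rfl
  | cons x xs ih =>
    intro i f g
    rw [pvBLoop, pvBLoop, if_neg (by omega : ¬ ((0:Int) > 0)), if_neg (by omega : ¬ ((0:Int) > 0))]
    by_cases h : i < n - nb ∧ x ≠ "no_hit"
    · rw [if_pos h, if_pos h]
    · rw [if_neg h, if_neg h, ih]

-- Once i has passed n - nb, B's loop copies the rest unchanged.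
theorem pvBLoop_tail (nb n : Int) : ∀ (xs : List String) (i : Int) (f : String),
    n - nb ≤ i → pvBLoop nb n i 0 f xs = xs := by
  intro xs
  induction xs with
  | nil => intro i f _; rfl
  | cons x xs ih =>
    intro i f h
    rw [pvBLoop, if_neg (by omega : ¬ ((0:Int) > 0)),
      if_neg (by exact fun hc => absurd hc.1 (by omega))]
    rw [ih (i + 1) f (by omega)]

-- The countdown plays out: r copies of fill, then back to countdown 0.
theorem pvBLoop_countdown (nb n : Int) : ∀ (r : Nat) (xs : List String) (i : Int) (f : String),
    r ≤ xs.length →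
    pvBLoop nb n i (r : Int) f xs =
      List.replicate r f ++ pvBLoop nb n (i + r) 0 f (xs.drop r) := by
  intro r
  induction r with
  | zero => intro xs i f _; simp
  | succ r ih =>
    intro xs i f h
    match xs with
    | [] => simp at h
    | x :: xs =>
      rw [pvBLoop, if_pos (by omega : ((r + 1 : Nat) : Int) > 0)]
      have hr : ((r + 1 : Nat) : Int) - 1 = ((r : Nat) : Int) := by omega
      rw [hr, ih xs (i + 1) f (by simpa using Nat.lt_succ_iff.mp (by simpa using h))]
      rw [show i + 1 + ((r : Nat) : Int) = i + ((r + 1 : Nat) : Int) from by omega]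
      simp [List.replicate_succ]

-- A's inner write loop rewrites positions i+1 … i+m with v.
theorem pvA_fold_set (v : String) : ∀ (m : Nat) (i : Nat) (ys : List String),
    i + m < ys.length →
    (PySem.List.pyRange 0 (m : Int) 1).foldl
        (fun acc j => PySem.List.pySetD acc ((i : Int) + j + 1) v) ys
      = ys.take (i + 1) ++ List.replicate m v ++ ys.drop (i + m + 1) := by
  intro m
  induction m with
  | zero =>
    intro i ys h
    rw [show ((0 : Nat) : Int) = 0 from rfl, PySem.List.pyRange_one_eq_nil le_rfl]
    simp
  | succ m ih =>
    intro i ys h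
    rw [show ((m + 1 : Nat) : Int) = (m : Int) + 1 from by omega,
      PySem.List.pyRange_one_succ_right (Int.natCast_nonneg _), List.foldl_append]
    rw [ih i ys (by omega)]
    simp only [List.foldl_cons, List.foldl_nil]
    rw [show (i : Int) + (m : Int) + 1 = ((i + m + 1 : Nat) : Int) from by omega,
      PySem.List.pySetD_natCast]
    have hL : (ys.take (i + 1) ++ List.replicate m v).length = i + m + 1 := by
      simp [List.length_take]; omega
    rw [List.set_append_right _ _ (by omega)]
    rw [hL, Nat.sub_self]
    have hdl : i + m + 1 < ys.length := by omega
    rw [List.drop_eq_getElem_cons hdl, List.set_cons_zero]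
    rw [List.append_assoc]
    simp [List.replicate_succ']
    omega

-- Main invariant: at a window boundary, A's loop from i equals the untouched prefix
-- plus B's loop run from i with countdown 0.
theorem pvMain (nb : Int) (hnb : 0 ≤ nb) : ∀ (fuel : Nat) (i : Int) (ys : List String),
    0 ≤ i → (ys.length : Int) - nb - i ≤ (fuel : Int) →
    pvALoop nb fuel i ys =
      ys.take i.toNat ++ pvBLoop nb (ys.length : Int) i 0 "" (ys.drop i.toNat) := by
  obtain ⟨m, rfl⟩ : ∃ m : Nat, nb = (m : Int) := ⟨nb.toNat, by omega⟩
  intro fuel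
  induction fuel with
  | zero =>
    intro i ys hi hf
    rw [pvALoop, pvBLoop_tail _ _ _ _ _ (by omega)]
    simp
  | succ fuel ih =>
    intro i ys hi hf
    obtain ⟨ii, rfl⟩ : ∃ k : Nat, i = (k : Int) := ⟨i.toNat, by omega⟩
    rw [pvALoop]
    by_cases hc : ((ii : Nat) : Int) < (ys.length : Int) - ((m : Nat) : Int)
    · have hilen : ii < ys.length := by omega
      rw [if_pos hc, PySem.List.pyGet?_ofNat ys ii hilen]
      by_cases hv : ys[ii] ≠ "no_hit"
      · simp only [if_pos hv]
        rw [pvA_fold_set _ m ii ys (by omega)]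
        have hLlen : (List.take (ii + 1) ys ++ List.replicate m ys[ii]).length = ii + m + 1 := by
          simp [List.length_take]; omega
        have hlenN : (List.take (ii + 1) ys ++ List.replicate m ys[ii] ++ List.drop (ii + m + 1) ys).length = ys.length := by
          simp [List.length_take]; omega
        rw [show ((ii : Nat) : Int) + ((m : Nat) : Int) + 1 = ((ii + m + 1 : Nat) : Int) from by omega]
        rw [ih ((ii + m + 1 : Nat) : Int) _ (Int.natCast_nonneg _)
          (by rw [hlenN]; push_cast at hf ⊢; omega)]
        rw [hlenN]
        rw [show ((ii + m + 1 : Nat) : Int).toNat = ii + m + 1 from by omega]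
        rw [List.take_left' hLlen, List.drop_left' hLlen]
        rw [show (((ii : Nat) : Int)).toNat = ii from by omega]
        rw [List.drop_eq_getElem_cons hilen, pvBLoop,
          if_neg (by omega : ¬ ((0:Int) > 0)), if_pos ⟨hc, hv⟩]
        rw [pvBLoop_countdown _ _ m (ys.drop (ii + 1)) _ _ (by simp [List.length_drop]; omega)]
        rw [List.drop_drop]
        rw [pvBLoop_fill_irrel _ _ _ _ ys[ii] ""]
        rw [show ((ii : Nat) : Int) + 1 + ((m : Nat) : Int) = ((ii + m + 1 : Nat) : Int) from by omega]
        rw [show ii + 1 + m = ii + m + 1 from by omega]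
        rw [List.take_add_one, List.getElem?_eq_getElem hilen]
        simp only [Option.toList_some, List.append_assoc, List.cons_append, List.nil_append, Nat.cast_add, Nat.cast_one]
      · simp only [if_neg hv]
        rw [show ((ii : Nat) : Int) + 1 = ((ii + 1 : Nat) : Int) from by omega]
        rw [ih ((ii + 1 : Nat) : Int) ys (Int.natCast_nonneg _) (by push_cast at hf ⊢; omega)]
        rw [show ((ii + 1 : Nat) : Int).toNat = ii + 1 from by omega,
          show (((ii : Nat) : Int)).toNat = ii from by omega]
        rw [List.drop_eq_getElem_cons hilen, pvBLoop,
          if_neg (by omega : ¬ ((0:Int) > 0)),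
          if_neg (by exact fun hcon => hcon.2 (by simpa using hv))]
        rw [List.take_add_one, List.getElem?_eq_getElem hilen]
        simp only [Option.toList_some, List.append_assoc, List.cons_append, List.nil_append, Nat.cast_add, Nat.cast_one]
    · rw [if_neg hc, pvBLoop_tail _ _ _ _ _ (by omega)]
      simp

-- ===== VERDICT (by name: the statement is the Claim_ definition above) =====
theorem multiply_targets_spec : Claim_equal_multiply_targets := by
  intro y nb _ hpre
  have hnb : 0 ≤ nb := hpre
  unfold Spec_multiply_targets multiply_targets multiply_targets_alt
  simpa using pvMain nb hnb (y.length + 1) 0 y le_rfl (by push_cast; omega)
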